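-- pv_equiv track=rewrite | github.com/sirkibsirkib/overlaps_new | main_alg.py | sort_and_deduplicate_solutions
-- ===== SOURCE A (Python) =====
-- def redundant_solutions(a, b):
-- 	for i in range(len(a)-1): #chop off cigar
-- 		if a[i] != b[i]:
-- 			return False
-- 	return True
--
-- def sort_and_deduplicate_solutions(solution_set):
-- 	ret = []
-- 	p = None,None,None,None,None,None,None,None,None
-- 	for x in sorted(solution_set):
-- 		if not redundant_solutions(p, x):
-- 			ret.append(x)
-- 			p = x
-- 	return ret
-- ===== SOURCE B (Python) =====
-- def sort_and_deduplicate_solutions(solution_set):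
-- 	best = {}
-- 	for x in solution_set:
-- 		k = x[:-1]
-- 		if k not in best or x < best[k]:
-- 			best[k] = x
-- 	return sorted(best.values())
-- ===== Notes on version B (the rewrite author's own statement) =====
-- stated objective: alternative
-- what changed: Instead of sorting the whole multiset and dropping adjacent same-prefix entries, B makes one unsorted pass keeping the minimal tuple per 8-field prefix in a dict (dedup before sorting) and then sorts only the representatives, so the sort runs on the unique keys rather than on all n elements.
import Mathlib
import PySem

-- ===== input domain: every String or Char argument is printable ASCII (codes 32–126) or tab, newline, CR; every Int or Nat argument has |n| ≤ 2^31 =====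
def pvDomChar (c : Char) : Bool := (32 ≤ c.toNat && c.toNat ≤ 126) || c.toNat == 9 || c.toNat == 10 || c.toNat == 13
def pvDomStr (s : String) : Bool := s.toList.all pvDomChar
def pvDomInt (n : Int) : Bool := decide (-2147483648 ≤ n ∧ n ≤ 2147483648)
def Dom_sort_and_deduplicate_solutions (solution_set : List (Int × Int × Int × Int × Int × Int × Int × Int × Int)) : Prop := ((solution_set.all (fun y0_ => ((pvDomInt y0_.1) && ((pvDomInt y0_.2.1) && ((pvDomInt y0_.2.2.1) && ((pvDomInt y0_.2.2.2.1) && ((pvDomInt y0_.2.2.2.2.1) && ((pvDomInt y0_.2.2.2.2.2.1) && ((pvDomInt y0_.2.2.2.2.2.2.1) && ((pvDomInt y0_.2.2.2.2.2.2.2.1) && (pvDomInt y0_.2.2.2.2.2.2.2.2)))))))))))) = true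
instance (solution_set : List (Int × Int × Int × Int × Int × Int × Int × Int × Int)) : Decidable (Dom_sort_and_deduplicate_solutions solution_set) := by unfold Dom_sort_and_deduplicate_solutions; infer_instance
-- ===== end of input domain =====

-- B dedups BEFORE sorting: one unsorted pass keeps the minimal tuple per 8-field prefix in a
-- dict, then only the representatives are sorted (alternative staging; A sorts everything first
-- and drops adjacent same-prefix entries).


-- Python compares 9-tuples lexicographically; this key makes PySem.List.sorted use exactly that order.
def pvLexKey9 (x : Int × Int × Int × Int × Int × Int × Int × Int × Int) :
    Int ×ₗ Int ×ₗ Int ×ₗ Int ×ₗ Int ×ₗ Int ×ₗ Int ×ₗ Int ×ₗ Int :=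
  toLex (x.1, toLex (x.2.1, toLex (x.2.2.1, toLex (x.2.2.2.1, toLex (x.2.2.2.2.1,
    toLex (x.2.2.2.2.2.1, toLex (x.2.2.2.2.2.2.1, toLex (x.2.2.2.2.2.2.2.1, x.2.2.2.2.2.2.2.2))))))))

-- ===== PORT A =====
-- A's p starts as a 9-tuple of Nones; since None != int already at i = 0, redundant_solutions(p, x)
-- is False then — ported as the Option none case. For a real previous tuple the loop compares the
-- first len(a)-1 = 8 fields in order, short-circuiting, ported as the chain of && below.
def redundant_solutions (a : Option (Int × Int × Int × Int × Int × Int × Int × Int × Int))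
    (b : Int × Int × Int × Int × Int × Int × Int × Int × Int) : Bool :=
  match a with
  | none => false
  | some a =>
      decide (a.1 = b.1) && decide (a.2.1 = b.2.1) && decide (a.2.2.1 = b.2.2.1) &&
      decide (a.2.2.2.1 = b.2.2.2.1) && decide (a.2.2.2.2.1 = b.2.2.2.2.1) &&
      decide (a.2.2.2.2.2.1 = b.2.2.2.2.2.1) && decide (a.2.2.2.2.2.2.1 = b.2.2.2.2.2.2.1) &&
      decide (a.2.2.2.2.2.2.2.1 = b.2.2.2.2.2.2.2.1)

def sort_and_deduplicate_solutions (solution_set : List (Int × Int × Int × Int × Int × Int × Int × Int × Int)) : List (Int × Int × Int × Int × Int × Int × Int × Int × Int) :=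
  ((PySem.List.sorted solution_set pvLexKey9 false).foldl
    (fun st x => if redundant_solutions st.2 x then st else (st.1 ++ [x], some x))
    (([] : List (Int × Int × Int × Int × Int × Int × Int × Int × Int)),
     (none : Option (Int × Int × Int × Int × Int × Int × Int × Int × Int)))).1

-- ===== PORT B =====
-- x[:-1] of a 9-tuple: its first 8 fields.
def pvFirst8 (x : Int × Int × Int × Int × Int × Int × Int × Int × Int) :
    Int × Int × Int × Int × Int × Int × Int × Int :=
  (x.1, x.2.1, x.2.2.1, x.2.2.2.1, x.2.2.2.2.1, x.2.2.2.2.2.1, x.2.2.2.2.2.2.1, x.2.2.2.2.2.2.2.1)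

-- the loop body: 'if k not in best or x < best[k]: best[k] = x' (short-circuit 'or' as a match on get?)
def pvUpd (best : PySem.Dict (Int × Int × Int × Int × Int × Int × Int × Int)
      (Int × Int × Int × Int × Int × Int × Int × Int × Int))
    (x : Int × Int × Int × Int × Int × Int × Int × Int × Int) :
    PySem.Dict (Int × Int × Int × Int × Int × Int × Int × Int)
      (Int × Int × Int × Int × Int × Int × Int × Int × Int) :=
  match best.get? (pvFirst8 x) with
  | none => best.insert (pvFirst8 x) x
  | some v => if pvLexKey9 x < pvLexKey9 v then best.insert (pvFirst8 x) x else best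

def sort_and_deduplicate_solutions_alt (solution_set : List (Int × Int × Int × Int × Int × Int × Int × Int × Int)) : List (Int × Int × Int × Int × Int × Int × Int × Int × Int) :=
  PySem.List.sorted ((solution_set.foldl pvUpd PySem.Dict.empty).values) pvLexKey9 false

-- ===== PRECONDITION & SPEC =====
-- explicit DecidableEq for the 9-tuple (automatic synthesis exceeds the default instance-size limit)
def pvDecEq2 : DecidableEq (Int × Int) := instDecidableEqProd
def pvDecEq3 : DecidableEq (Int × Int × Int) := @instDecidableEqProd _ _ _ pvDecEq2
def pvDecEq4 : DecidableEq (Int × Int × Int × Int) := @instDecidableEqProd _ _ _ pvDecEq3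
def pvDecEq5 : DecidableEq (Int × Int × Int × Int × Int) := @instDecidableEqProd _ _ _ pvDecEq4
def pvDecEq6 : DecidableEq (Int × Int × Int × Int × Int × Int) := @instDecidableEqProd _ _ _ pvDecEq5
def pvDecEq7 : DecidableEq (Int × Int × Int × Int × Int × Int × Int) := @instDecidableEqProd _ _ _ pvDecEq6
def pvDecEq8 : DecidableEq (Int × Int × Int × Int × Int × Int × Int × Int) := @instDecidableEqProd _ _ _ pvDecEq7
def pvDecEq9 : DecidableEq (Int × Int × Int × Int × Int × Int × Int × Int × Int) := @instDecidableEqProd _ _ _ pvDecEq8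

def Spec_sort_and_deduplicate_solutions (solution_set : List (Int × Int × Int × Int × Int × Int × Int × Int × Int)) (out : List (Int × Int × Int × Int × Int × Int × Int × Int × Int)) : Prop := out = sort_and_deduplicate_solutions_alt solution_set
instance (solution_set : List (Int × Int × Int × Int × Int × Int × Int × Int × Int)) (out : List (Int × Int × Int × Int × Int × Int × Int × Int × Int)) : Decidable (Spec_sort_and_deduplicate_solutions solution_set out) := by unfold Spec_sort_and_deduplicate_solutions; exact @instDecidableEqList _ pvDecEq9 _ _

-- ===== CLAIM (what is proved, stated in full; the proofs are below) =====
def Claim_equal_sort_and_deduplicate_solutions : Prop := ∀ (solution_set : List (Int × Int × Int × Int × Int × Int × Int × Int × Int)), Dom_sort_and_deduplicate_solutions solution_set → Spec_sort_and_deduplicate_solutions solution_set (sort_and_deduplicate_solutions solution_set)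

-- ===== LEMMAS AND PROOFS =====

-- lex key on the 8-field prefix, used only by the proof
def pvLexKey8 (x : Int × Int × Int × Int × Int × Int × Int × Int) :
    Int ×ₗ Int ×ₗ Int ×ₗ Int ×ₗ Int ×ₗ Int ×ₗ Int ×ₗ Int :=
  toLex (x.1, toLex (x.2.1, toLex (x.2.2.1, toLex (x.2.2.2.1, toLex (x.2.2.2.2.1,
    toLex (x.2.2.2.2.2.1, toLex (x.2.2.2.2.2.2.1, x.2.2.2.2.2.2.2)))))))

lemma pv_key9_inj (a b : Int × Int × Int × Int × Int × Int × Int × Int × Int)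
    (h : pvLexKey9 a = pvLexKey9 b) : a = b := by
  obtain ⟨a1,a2,a3,a4,a5,a6,a7,a8,a9⟩ := a
  obtain ⟨b1,b2,b3,b4,b5,b6,b7,b8,b9⟩ := b
  simp only [pvLexKey9, toLex_inj, Prod.mk.injEq] at h
  simp only [Prod.mk.injEq]
  omega

lemma pv_prefix_mono (a b : Int × Int × Int × Int × Int × Int × Int × Int × Int)
    (h : pvLexKey9 a ≤ pvLexKey9 b) : pvLexKey8 (pvFirst8 a) ≤ pvLexKey8 (pvFirst8 b) := by
  simp only [pvLexKey9, pvLexKey8, pvFirst8, Prod.Lex.le_iff, ofLex_toLex] at *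
  omega

lemma pv_key8_antisymm (u v : Int × Int × Int × Int × Int × Int × Int × Int)
    (h1 : pvLexKey8 u ≤ pvLexKey8 v) (h2 : pvLexKey8 v ≤ pvLexKey8 u) : u = v := by
  obtain ⟨u1,u2,u3,u4,u5,u6,u7,u8⟩ := u
  obtain ⟨v1,v2,v3,v4,v5,v6,v7,v8⟩ := v
  simp only [pvLexKey8, Prod.Lex.le_iff, ofLex_toLex] at h1 h2
  simp only [Prod.mk.injEq]
  omega

lemma pv_redundant_iff (m x : Int × Int × Int × Int × Int × Int × Int × Int × Int) :
    redundant_solutions (some m) x = true ↔ pvFirst8 m = pvFirst8 x := by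
  simp [redundant_solutions, pvFirst8, Prod.ext_iff, and_assoc]

-- the minimum-per-prefix specification both programs compute
def pvIsMin (l : List (Int × Int × Int × Int × Int × Int × Int × Int × Int))
    (v : Int × Int × Int × Int × Int × Int × Int × Int × Int) : Prop :=
  v ∈ l ∧ ∀ y ∈ l, pvFirst8 y = pvFirst8 v → pvLexKey9 v ≤ pvLexKey9 y

-- ---- A side: the fold as a structural recursion ----
def pvGA (p : Option (Int × Int × Int × Int × Int × Int × Int × Int × Int)) :
    List (Int × Int × Int × Int × Int × Int × Int × Int × Int) →
    List (Int × Int × Int × Int × Int × Int × Int × Int × Int)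
  | [] => []
  | x :: xs => if redundant_solutions p x then pvGA p xs else x :: pvGA (some x) xs

lemma pv_foldA_eq (xs : List (Int × Int × Int × Int × Int × Int × Int × Int × Int)) :
    ∀ ret p, (xs.foldl (fun st x => if redundant_solutions st.2 x then st else (st.1 ++ [x], some x))
      (ret, p)).1 = ret ++ pvGA p xs := by
  induction xs with
  | nil => intro ret p; simp [pvGA]
  | cons x xs ih =>
      intro ret p
      by_cases h : redundant_solutions p x = true
      · simp [pvGA, h, ih]
      · simp [pvGA, h, ih]

lemma pv_gA_mem (xs : List (Int × Int × Int × Int × Int × Int × Int × Int × Int)) :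
    ∀ p, xs.Pairwise (fun a b => pvLexKey9 a ≤ pvLexKey9 b) →
    (∀ m, p = some m → ∀ y ∈ xs, pvLexKey9 m ≤ pvLexKey9 y) →
    ∀ v, v ∈ pvGA p xs ↔
      (v ∈ xs ∧ (∀ m, p = some m → pvFirst8 v ≠ pvFirst8 m) ∧
        ∀ y ∈ xs, pvFirst8 y = pvFirst8 v → pvLexKey9 v ≤ pvLexKey9 y) := by
  induction xs with
  | nil => intro p _ _ v; simp [pvGA]
  | cons x xs ih =>
      intro p hpw hp v
      have hx : ∀ y ∈ xs, pvLexKey9 x ≤ pvLexKey9 y := (List.pairwise_cons.mp hpw).1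
      have hpw' := (List.pairwise_cons.mp hpw).2
      by_cases hred : redundant_solutions p x = true
      · -- p = some m with pvFirst8 m = pvFirst8 x : x is skipped
        obtain ⟨m, rfl⟩ : ∃ m, p = some m := by
          cases p with
          | none => simp [redundant_solutions] at hred
          | some m => exact ⟨m, rfl⟩
        have hmx : pvFirst8 m = pvFirst8 x := (pv_redundant_iff m x).mp hred
        have hih := ih (some m) hpw' (fun m' hm' y hy => by
          cases hm'; exact hp m rfl y (List.mem_cons_of_mem _ hy)) v
        simp only [pvGA, hred, if_true]
        rw [hih]
        constructor
        · rintro ⟨hv, hne, hmin⟩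
          refine ⟨List.mem_cons_of_mem _ hv, hne, ?_⟩
          intro y hy hkey
          rcases List.mem_cons.mp hy with h | hy
          · exact absurd (hmx ▸ h ▸ hkey) (Ne.symm (hne m rfl))
          · exact hmin y hy hkey
        · rintro ⟨hv, hne, hmin⟩
          have hvx : v ∈ xs := by
            rcases List.mem_cons.mp hv with h | hv
            · exact absurd (h ▸ hmx) (fun hh => hne m rfl hh.symm)
            · exact hv
          exact ⟨hvx, hne, fun y hy hkey => hmin y (List.mem_cons_of_mem _ hy) hkey⟩
      · -- x is kept; the tail recurses with p = some x
        rw [Bool.not_eq_true] at hred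
        have hih := ih (some x) hpw' (fun m' hm' y hy => by cases hm'; exact hx y hy) v
        simp only [pvGA, hred, Bool.false_eq_true, if_false]
        rw [List.mem_cons, List.mem_cons, hih]
        constructor
        · rintro (hvx | ⟨hv, hne, hmin⟩)
          · refine ⟨Or.inl hvx, ?_, ?_⟩
            · intro m hm hkey
              subst hm
              have : redundant_solutions (some m) x = true :=
                (pv_redundant_iff m x).mpr (hvx ▸ hkey.symm)
              exact absurd this (by simp [hred])
            · intro y hy hkey
              rcases List.mem_cons.mp hy with h | hy
              · exact h ▸ hvx ▸ le_refl _
              · exact hvx ▸ hx y hy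
          · refine ⟨Or.inr hv, ?_, ?_⟩
            · intro m hm hkey
              subst hm
              have h1 : pvLexKey9 m ≤ pvLexKey9 x := hp m rfl x List.mem_cons_self
              have h2 : pvLexKey9 x ≤ pvLexKey9 v := hx v hv
              have h8 : pvFirst8 x = pvFirst8 m := pv_key8_antisymm _ _
                (hkey ▸ pv_prefix_mono _ _ h2) (pv_prefix_mono _ _ h1)
              have : redundant_solutions (some m) x = true :=
                (pv_redundant_iff m x).mpr h8.symm
              exact absurd this (by simp [hred])
            · intro y hy hkey
              rcases List.mem_cons.mp hy with h | hy
              · exact absurd (h ▸ hkey).symm (hne x rfl)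
              · exact hmin y hy hkey
        · rintro ⟨hv, hne, hmin⟩
          by_cases hvx : v = x
          · exact Or.inl hvx
          · right
            have hv' : v ∈ xs := by
              rcases hv with h | h
              · exact absurd h hvx
              · exact h
            refine ⟨hv', ?_, fun y hy hkey => hmin y (List.mem_cons_of_mem _ hy) hkey⟩
            intro m hm hkey
            injection hm with hm2
            subst hm2
            have h1 : pvLexKey9 v ≤ pvLexKey9 x := hmin x List.mem_cons_self hkey.symm
            have h2 : pvLexKey9 x ≤ pvLexKey9 v := hx v hv'
            exact hvx (pv_key9_inj v x (le_antisymm h1 h2))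

lemma pv_gA_pairwise (xs : List (Int × Int × Int × Int × Int × Int × Int × Int × Int)) :
    ∀ p, xs.Pairwise (fun a b => pvLexKey9 a ≤ pvLexKey9 b) →
    (∀ m, p = some m → ∀ y ∈ xs, pvLexKey9 m ≤ pvLexKey9 y) →
    (pvGA p xs).Pairwise (fun a b => pvLexKey9 a < pvLexKey9 b) := by
  induction xs with
  | nil => intro p _ _; simp [pvGA]
  | cons x xs ih =>
      intro p hpw hp
      have hx : ∀ y ∈ xs, pvLexKey9 x ≤ pvLexKey9 y := (List.pairwise_cons.mp hpw).1
      have hpw' := (List.pairwise_cons.mp hpw).2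
      by_cases hred : redundant_solutions p x = true
      · simp only [pvGA, hred, if_true]
        obtain ⟨m, rfl⟩ : ∃ m, p = some m := by
          cases p with
          | none => simp [redundant_solutions] at hred
          | some m => exact ⟨m, rfl⟩
        exact ih (some m) hpw' (fun m' hm' y hy => by
          cases hm'; exact hp m rfl y (List.mem_cons_of_mem _ hy))
      · rw [Bool.not_eq_true] at hred
        simp only [pvGA, hred, Bool.false_eq_true, if_false]
        have hhx : ∀ m', some x = some m' → ∀ y ∈ xs, pvLexKey9 m' ≤ pvLexKey9 y :=
          fun m' hm' y hy => by injection hm' with h; subst h; exact hx y hy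
        refine List.pairwise_cons.mpr ⟨?_, ih (some x) hpw' hhx⟩
        intro v hv
        obtain ⟨hvxs, hne, _⟩ := (pv_gA_mem xs (some x) hpw' hhx v).mp hv
        refine lt_of_le_of_ne (hx v hvxs) ?_
        intro he
        exact hne x rfl (by rw [pv_key9_inj x v he])

-- ---- B side: invariant of the dict fold ----
def pvInvB (best : PySem.Dict (Int × Int × Int × Int × Int × Int × Int × Int)
      (Int × Int × Int × Int × Int × Int × Int × Int × Int))
    (done : List (Int × Int × Int × Int × Int × Int × Int × Int × Int)) : Prop :=
  best.keys.Nodup ∧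
  (∀ k, best.get? k = none → ∀ y ∈ done, pvFirst8 y ≠ k) ∧
  (∀ k v, best.get? k = some v → pvFirst8 v = k ∧ v ∈ done ∧
      ∀ y ∈ done, pvFirst8 y = k → pvLexKey9 v ≤ pvLexKey9 y)

lemma pv_invB_step (best : PySem.Dict (Int × Int × Int × Int × Int × Int × Int × Int)
      (Int × Int × Int × Int × Int × Int × Int × Int × Int))
    (done : List (Int × Int × Int × Int × Int × Int × Int × Int × Int))
    (x : Int × Int × Int × Int × Int × Int × Int × Int × Int)
    (h : pvInvB best done) : pvInvB (pvUpd best x) (done ++ [x]) := by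
  obtain ⟨hnd, hnone, hsome⟩ := h
  have hins : ∀ w, (pvLexKey9 x ≤ pvLexKey9 w ∨ best.get? (pvFirst8 x) = none) →
      best.get? (pvFirst8 x) = some w ∨ best.get? (pvFirst8 x) = none →
      pvInvB (best.insert (pvFirst8 x) x) (done ++ [x]) := by
    intro w hw hg
    refine ⟨PySem.Dict.nodup_keys_insert _ _ _ hnd, ?_, ?_⟩
    · intro k hk y hy
      have hkne : k ≠ pvFirst8 x := by
        intro hkx; subst hkx; rw [PySem.Dict.get?_insert_self] at hk; cases hk
      rw [PySem.Dict.get?_insert_of_ne _ _ hkne] at hk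
      rcases List.mem_append.mp hy with hy | hy
      · exact hnone k hk y hy
      · simp only [List.mem_singleton] at hy; subst hy; exact Ne.symm hkne
    · intro k v hk
      by_cases hkx : k = pvFirst8 x
      · subst hkx
        rw [PySem.Dict.get?_insert_self] at hk
        injection hk with hk; subst hk
        refine ⟨rfl, List.mem_append.mpr (Or.inr (by simp)), ?_⟩
        intro y hy hkey
        rcases List.mem_append.mp hy with hy | hy
        · rcases hg with hg | hg
          · obtain ⟨_, _, h3⟩ := hsome _ w hg
            have h4 := h3 y hy hkey
            rcases hw with hw | hw
            · exact le_trans hw h4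
            · rw [hw] at hg; cases hg
          · exact absurd hkey (hnone _ hg y hy)
        · simp only [List.mem_singleton] at hy; subst hy; exact le_refl _
      · rw [PySem.Dict.get?_insert_of_ne _ _ hkx] at hk
        obtain ⟨h1, h2, h3⟩ := hsome k v hk
        refine ⟨h1, List.mem_append.mpr (Or.inl h2), ?_⟩
        intro y hy hkey
        rcases List.mem_append.mp hy with hy | hy
        · exact h3 y hy hkey
        · simp only [List.mem_singleton] at hy; subst hy; exact absurd hkey.symm hkx
  unfold pvUpd
  cases hk0 : best.get? (pvFirst8 x) with
  | none => exact hins x (Or.inr hk0) (Or.inr hk0)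
  | some w =>
      by_cases hlt : pvLexKey9 x < pvLexKey9 w
      · show pvInvB (if pvLexKey9 x < pvLexKey9 w then best.insert (pvFirst8 x) x else best) (done ++ [x])
        rw [if_pos hlt]
        exact hins w (Or.inl (le_of_lt hlt)) (Or.inl hk0)
      · show pvInvB (if pvLexKey9 x < pvLexKey9 w then best.insert (pvFirst8 x) x else best) (done ++ [x])
        rw [if_neg hlt]
        refine ⟨hnd, ?_, ?_⟩
        · intro k hk y hy
          rcases List.mem_append.mp hy with hy | hy
          · exact hnone k hk y hy
          · simp only [List.mem_singleton] at hy; subst hy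
            intro hkey
            rw [← hkey, hk0] at hk; cases hk
        · intro k v hk
          obtain ⟨h1, h2, h3⟩ := hsome k v hk
          refine ⟨h1, List.mem_append.mpr (Or.inl h2), ?_⟩
          intro y hy hkey
          rcases List.mem_append.mp hy with hy | hy
          · exact h3 y hy hkey
          · simp only [List.mem_singleton] at hy
            have hg : best.get? k = some v := hk
            rw [← hkey, hy, hk0] at hg
            have hvw : w = v := by injection hg
            rw [hy, ← hvw]
            exact not_lt.mp hlt

lemma pv_invB_fold (xs : List (Int × Int × Int × Int × Int × Int × Int × Int × Int)) :
    ∀ best done, pvInvB best done → pvInvB (xs.foldl pvUpd best) (done ++ xs) := by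
  induction xs with
  | nil => intro best done h; simpa using h
  | cons x xs ih =>
      intro best done h
      have := ih (pvUpd best x) (done ++ [x]) (pv_invB_step best done x h)
      simpa [List.append_assoc] using this

lemma pv_invB_final (l : List (Int × Int × Int × Int × Int × Int × Int × Int × Int)) :
    pvInvB (l.foldl pvUpd PySem.Dict.empty) l := by
  have h0 : pvInvB PySem.Dict.empty [] := by
    refine ⟨?_, ?_, ?_⟩
    · exact PySem.Dict.nodup_keys_empty
    · intro k _ y hy; simp at hy
    · intro k v hk; rw [PySem.Dict.get?_empty] at hk; cases hk
  simpa using pv_invB_fold l PySem.Dict.empty [] h0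

lemma pv_vals_mem (l : List (Int × Int × Int × Int × Int × Int × Int × Int × Int)) (v) :
    v ∈ (l.foldl pvUpd PySem.Dict.empty).values ↔ pvIsMin l v := by
  obtain ⟨hnd, hnone, hsome⟩ := pv_invB_final l
  constructor
  · intro hv
    simp only [PySem.Dict.values, List.mem_map] at hv
    obtain ⟨⟨k, w⟩, hmem, hw⟩ := hv
    have hg := PySem.Dict.get?_of_mem_items _ hmem hnd
    obtain ⟨h1, h2, h3⟩ := hsome k w hg
    cases hw
    exact ⟨h2, fun y hy hkey => h3 y hy (hkey.trans h1)⟩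
  · rintro ⟨hvl, hmin⟩
    cases hg : (l.foldl pvUpd PySem.Dict.empty).get? (pvFirst8 v) with
    | none => exact absurd rfl (hnone _ hg v hvl)
    | some w =>
        obtain ⟨h1, h2, h3⟩ := hsome _ w hg
        have hwv : w = v := pv_key9_inj _ _ (le_antisymm (h3 v hvl rfl) (hmin w h2 h1))
        subst hwv
        simp only [PySem.Dict.values, List.mem_map]
        exact ⟨(pvFirst8 w, w), PySem.Dict.mem_items_of_get?_eq_some _ hg, rfl⟩

lemma pv_vals_nodup (l : List (Int × Int × Int × Int × Int × Int × Int × Int × Int)) :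
    (l.foldl pvUpd PySem.Dict.empty).values.Nodup := by
  obtain ⟨hnd, hnone, hsome⟩ := pv_invB_final l
  have hkeys : (l.foldl pvUpd PySem.Dict.empty).values.map pvFirst8
      = (l.foldl pvUpd PySem.Dict.empty).keys := by
    simp only [PySem.Dict.values, PySem.Dict.keys, List.map_map]
    refine List.map_congr_left ?_
    intro p hp
    have hg := PySem.Dict.get?_of_mem_items _ (show (p.1, p.2) ∈ _ from by simpa using hp) hnd
    exact (hsome p.1 p.2 hg).1
  exact List.Nodup.of_map pvFirst8 (hkeys ▸ hnd)

-- ===== VERDICT (by name: the statement is the Claim_ definition above) =====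
theorem sort_and_deduplicate_solutions_spec : Claim_equal_sort_and_deduplicate_solutions := by
  intro l _
  unfold Spec_sort_and_deduplicate_solutions sort_and_deduplicate_solutions
    sort_and_deduplicate_solutions_alt
  have hpw := PySem.List.sorted_pairwise l pvLexKey9
  have hperm := PySem.List.sorted_perm l pvLexKey9 false
  have hpnone : ∀ m, (none : Option (Int × Int × Int × Int × Int × Int × Int × Int × Int)) = some m →
      ∀ y ∈ PySem.List.sorted l pvLexKey9 false, pvLexKey9 m ≤ pvLexKey9 y := fun m hm => by cases hm
  rw [pv_foldA_eq]
  simp only [List.nil_append]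
  have hmem : ∀ v, v ∈ pvGA none (PySem.List.sorted l pvLexKey9 false) ↔ pvIsMin l v := by
    intro v
    rw [pv_gA_mem _ none hpw hpnone v]
    unfold pvIsMin
    constructor
    · rintro ⟨h1, _, h3⟩
      exact ⟨hperm.mem_iff.mp h1, fun y hy => h3 y (hperm.mem_iff.mpr hy)⟩
    · rintro ⟨h1, h3⟩
      exact ⟨hperm.mem_iff.mpr h1, fun m hm => absurd hm (by simp),
        fun y hy => h3 y (hperm.mem_iff.mp hy)⟩
  have hpwA := pv_gA_pairwise _ none hpw hpnone
  have hndA : (pvGA none (PySem.List.sorted l pvLexKey9 false)).Nodup :=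
    hpwA.imp (fun h => by intro he; rw [he] at h; exact lt_irrefl _ h)
  have hperm2 : (pvGA none (PySem.List.sorted l pvLexKey9 false)).Perm
      ((l.foldl pvUpd PySem.Dict.empty).values) :=
    (List.perm_ext_iff_of_nodup hndA (pv_vals_nodup l)).mpr
      (fun v => (hmem v).trans (pv_vals_mem l v).symm)
  exact (PySem.List.sorted_eq_of_perm_of_pairwise_lt _ _ pvLexKey9 hperm2 hpwA).symm
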